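-- pv_equiv track=rewrite | github.com/MrsBrodie/HCSSDD | Practice Course Assessment athletes/main.py | totalLocations
-- ===== SOURCE A (Python) =====
-- def totalLocations(location):
-- #set locations to 0
--   coatbridge=0
--   inverness=0
--   kirkcaldy=0
--   motherwell=0
--   dundee=0
--   livingston=0
-- #start counter for number of atheletes
--   for counter in range(len(location)):
-- #if location is found +1 to the total
--     if location[counter]=="Coatbridge":
--       coatbridge+=1
--     elif location[counter]=="Inverness":
--       inverness+=1
--     elif location[counter]=="Kirkcaldy":
--       kirkcaldy+=1
--     elif location[counter]=="Motherwell":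
--       motherwell+=1
--     elif location[counter]=="Dundee":
--       dundee+=1
--     elif location[counter]=="Livingston":
--       livingston+=1
-- #out coatbridge(),inverness(),kirkcaldy(),motherwell(),dundee(),livingston()
--   return coatbridge,inverness,kirkcaldy,motherwell,dundee,livingston
-- ===== SOURCE B (Python) =====
-- def totalLocations(location):
--     return (location.count("Coatbridge"),
--             location.count("Inverness"),
--             location.count("Kirkcaldy"),
--             location.count("Motherwell"),
--             location.count("Dundee"),
--             location.count("Livingston"))
-- ===== Notes on version B (the rewrite author's own statement) =====
-- stated objective: idiomatic
-- what changed: B makes six independent list.count passes, one per fixed key, instead of A's single index loop maintaining six scalar accumulators through a six-way if/elif chain; correct because the six counts are independent and each equals the key's multiplicity in the list.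
import Mathlib
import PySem

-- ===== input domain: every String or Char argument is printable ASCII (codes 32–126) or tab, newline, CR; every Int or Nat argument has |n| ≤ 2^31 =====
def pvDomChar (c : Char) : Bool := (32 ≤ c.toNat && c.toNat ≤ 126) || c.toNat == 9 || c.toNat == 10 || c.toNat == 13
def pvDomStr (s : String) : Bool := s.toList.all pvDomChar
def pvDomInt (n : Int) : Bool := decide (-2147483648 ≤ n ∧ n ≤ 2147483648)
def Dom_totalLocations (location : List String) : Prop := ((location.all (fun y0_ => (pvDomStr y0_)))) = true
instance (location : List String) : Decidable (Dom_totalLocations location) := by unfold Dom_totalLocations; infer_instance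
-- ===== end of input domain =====

-- B replaces A's single index loop over six accumulators with six independent list.count passes (idiomatic; same cost).

-- ===== PORT A =====
-- one iteration of A's if/elif chain over the six accumulators
def totalLocationsStep (st : Int × Int × Int × Int × Int × Int) (x : String) : Int × Int × Int × Int × Int × Int :=
  let (coatbridge, inverness, kirkcaldy, motherwell, dundee, livingston) := st
  if x == "Coatbridge" then (coatbridge + 1, inverness, kirkcaldy, motherwell, dundee, livingston)
  else if x == "Inverness" then (coatbridge, inverness + 1, kirkcaldy, motherwell, dundee, livingston)
  else if x == "Kirkcaldy" then (coatbridge, inverness, kirkcaldy + 1, motherwell, dundee, livingston)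
  else if x == "Motherwell" then (coatbridge, inverness, kirkcaldy, motherwell + 1, dundee, livingston)
  else if x == "Dundee" then (coatbridge, inverness, kirkcaldy, motherwell, dundee + 1, livingston)
  else if x == "Livingston" then (coatbridge, inverness, kirkcaldy, motherwell, dundee, livingston + 1)
  else (coatbridge, inverness, kirkcaldy, motherwell, dundee, livingston)

def totalLocations (location : List String) : Int × Int × Int × Int × Int × Int :=
  (PySem.List.pyRange 0 (PySem.List.len location) 1).foldl
    (fun st counter => totalLocationsStep st (PySem.List.pyGetD location counter ""))  -- index always in range: default unused
    (0, 0, 0, 0, 0, 0)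

-- ===== PORT B =====
def totalLocations_alt (location : List String) : Int × Int × Int × Int × Int × Int :=
  (PySem.List.count location "Coatbridge",
   PySem.List.count location "Inverness",
   PySem.List.count location "Kirkcaldy",
   PySem.List.count location "Motherwell",
   PySem.List.count location "Dundee",
   PySem.List.count location "Livingston")

-- ===== PRECONDITION & SPEC =====
def Spec_totalLocations (location : List String) (out : Int × Int × Int × Int × Int × Int) : Prop := out = totalLocations_alt location
instance (location : List String) (out : Int × Int × Int × Int × Int × Int) : Decidable (Spec_totalLocations location out) := by unfold Spec_totalLocations; infer_instance

-- ===== CLAIM (what is proved, stated in full; the proofs are below) =====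
def Claim_equal_totalLocations : Prop := ∀ (location : List String), Dom_totalLocations location → Spec_totalLocations location (totalLocations location)

-- ===== LEMMAS AND PROOFS =====
theorem totalLocations_foldl (l : List String) (a b c d e f : Int) :
    l.foldl totalLocationsStep (a, b, c, d, e, f)
    = (a + l.count "Coatbridge", b + l.count "Inverness", c + l.count "Kirkcaldy",
       d + l.count "Motherwell", e + l.count "Dundee", f + l.count "Livingston") := by
  induction l generalizing a b c d e f with
  | nil => simp
  | cons x xs ih =>
    simp only [List.foldl_cons, List.count_cons, totalLocationsStep]
    split_ifs with h1 h2 h3 h4 h5 h6 <;>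
      simp_all [ih] <;> push_cast <;> ring

-- ===== VERDICT (by name: the statement is the Claim_ definition above) =====
theorem totalLocations_spec : Claim_equal_totalLocations := by
  intro location _
  unfold Spec_totalLocations totalLocations totalLocations_alt
  simp only [PySem.List.len_eq]
  rw [PySem.List.foldl_pyRange_zero_pyGetD' location "" totalLocationsStep (0, 0, 0, 0, 0, 0)]
  simp [totalLocations_foldl, PySem.List.count_eq]
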